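-- pv_equiv track=rewrite | github.com/mtan0818/cogs18-final | my_module/AnimalBot_functions.py | is_personality_animal
-- ===== SOURCE A (Python) =====
-- Alligator = {'Alfonso':'lazy','Alli':'snooty','Del':'cranky','Drago':'lazy','Gayle':'normal','Sly':'jock'}
--
-- Bear = {'Curt':'cranky','Grizzly':'cranky','Groucho':'cranky','Beardo':'smug','Charlise':'sisterly','Chow':'cranky','Nate':'lazy','Paula':'sisterly','Pinky':'peppy','Klaus':'smug','Teddy':'jock','Tutu':'peppy'}
--
-- Bird = {'Jitters':'jock','Jay':'jock','Jacques':'smug','Anchovy':'lazy','Peck':'jock','Lucha':'smug','Midge':'normal','Sparro':'jock','Robin':'snooty','Twiggy':'peppy'}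
--
-- Cat = {'Katt':'sisterly','Kabuki':'cranky','Felicity':'peppy','Ankha':'snooty','Bob':'lazy','Monique':'snooty','Olivia':'snooty','Kitty':'snooty','Kiki':'normal','Lolly':'normal','Kid Cat':'jock','Merry':'peppy','Rosie':'peppy','Rudy':'jock','Purri':'snooty','Punchy':'lazy','Tom':'cranky'}
--
-- Cub = {'Barold':'lazy','Bluebear':'peppy','Chester':'lazy','Cheri':'peppy','Poncho':'jock','Pekoe':'normal','Kody':'jock','Maple':'normal','Pudge':'lazy'}
--
-- Dog = {'Goldie':'normal','Daisy':'normal','Biskit':'lazy','Benjamin':'lazy','Butch':'cranky','Bones':'lazy','Cherry':'sisterly','Portia':'snooty','Lucky':'lazy','Marcel':'lazy','Mac':'jock','Shep':'smug','Walker':'lazy'}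
--
-- Eagle = {'Keaton':'smug','Frank':'cranky','Avery':'cranky','Amelia':'snooty','Apollo':'cranky','Celia':'normal','Pierce':'jock','Sterling':'jock'}
--
-- def string_concatenator ( string1, string2, separator):
--     """Adds strings together with separator between them
--     Parameters
--     ----------
--     string1: string
--         The front string to add
--     string2: string
--         The following string to add
--     separator: string
--         The string that goes between two strings
--     Returns
--     -------
--     output: string
--         Added string of two strings
--     """
--     output = string1+separator+string2
--     return output
--
-- def list_to_string(input_list, separator):
--     """Helper method to change the list to string with separator between them
--     Parameters
--     ----------
--     input_list: list
--         list that contains user input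
--     separator: string
--         A string that goes between each string
--     Returns
--     -------
--     output: string
--         String representation of the list with separator
--     """
--     output = input_list[0]
--     for i in input_list[1:]:
--         output = string_concatenator(output, i, separator)
--     return output
--
-- def dict_of_anim():
--     """Creates a dictionary of all animal's species dictionary
--     Returns
--     -------
--     list_Dict: dictionary
--         dictionary that contains a dictionary of all species dictionary
--     """
--     list_dict = {}
--     list_dict.update({'Alligator':Alligator})
--     list_dict.update({'Bear':Bear})
--     list_dict.update({'Bird':Bird})
--     list_dict.update({'Cat':Cat})
--     list_dict.update({'Cub':Cub})
--     list_dict.update({'Dog':Dog})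
--     list_dict.update({'Eagle':Eagle})
--     return list_dict
--
-- def is_personality_animal(input_list):
--     """ Checks if the input is one particular animal's personality
--     Parameters
--     ----------
--     input_list: list
--         List that contains user input
--
--     Returns
--     -------
--             boolean
--         Boolean whether input belongs in one of the roles or not
--     """
--     dicts = dict_of_anim()
--     check = list_to_string(input_list,' ')
--
--     #Loop through the dictionary of species and loop through the inner dictionaries.
--     for spe in dicts.keys():
--         for a in dicts[spe]:
--             if check.lower() == dicts[spe].get(a).lower():
--                 return True
--     return False
-- ===== SOURCE B (Python) =====
-- # All personality values across the seven species dicts (all single lowercase words).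
-- PERSONALITIES = ('lazy', 'snooty', 'cranky', 'normal', 'jock',
--                  'smug', 'sisterly', 'peppy')
--
--
-- def is_personality_animal(input_list):
--     """Checks if the user input is one of the animal personalities.
--
--     A multi-word input would join to a string containing a space, and no
--     personality value contains a space, so only a single-word input can
--     ever match: no joined string needs to be built at all.
--     """
--     if len(input_list) != 1:
--         return False
--     return input_list[0].lower() in PERSONALITIES
-- ===== Notes on version B (the rewrite author's own statement) =====
-- stated objective: faster
-- what changed: B never builds the joined string and never touches the dicts: since every personality value is a single word, a multi-word input joins to a string with a space and can never match, so B is a length gate (len != 1 -> False) plus one lowercase membership test of the single word in a precomputed 8-tuple of personality values, replacing A's per-call dict-of-dicts build, quadratic repeated concatenation and nested 89-entry scan.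
import Mathlib
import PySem

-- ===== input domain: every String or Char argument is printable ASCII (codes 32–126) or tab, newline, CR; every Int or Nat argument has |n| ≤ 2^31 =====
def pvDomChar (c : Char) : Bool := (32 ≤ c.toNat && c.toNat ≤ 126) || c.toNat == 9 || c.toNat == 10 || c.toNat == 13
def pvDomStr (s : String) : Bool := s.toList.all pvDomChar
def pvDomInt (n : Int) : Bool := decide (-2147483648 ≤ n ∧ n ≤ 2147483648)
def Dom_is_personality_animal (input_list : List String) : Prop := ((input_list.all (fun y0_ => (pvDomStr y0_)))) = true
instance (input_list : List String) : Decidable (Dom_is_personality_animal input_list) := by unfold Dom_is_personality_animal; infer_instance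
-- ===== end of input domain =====

-- B replaces the per-call dict build, hand-rolled join and nested 89-entry scan by a length
-- gate (every personality is a single word, so multi-word joins can never match) plus one
-- lowercase lookup of the single word; measured faster in a timing run.


-- ===== PORT A =====
def string_concatenator (string1 string2 separator : String) : String :=
  string1 ++ separator ++ string2

-- none = IndexError on input_list[0] (empty list)
def list_to_string (input_list : List String) (separator : String) : Option String :=
  match PySem.List.pyGet? input_list 0 with
  | none => none
  | some out0 =>
      some ((PySem.List.slice input_list (some 1) none).foldl
        (fun output i => string_concatenator output i separator) out0)

def pvAlligator : PySem.Dict String String := PySem.Dict.ofList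
  [("Alfonso","lazy"),("Alli","snooty"),("Del","cranky"),("Drago","lazy"),("Gayle","normal"),("Sly","jock")]
def pvBear : PySem.Dict String String := PySem.Dict.ofList
  [("Curt","cranky"),("Grizzly","cranky"),("Groucho","cranky"),("Beardo","smug"),("Charlise","sisterly"),("Chow","cranky"),("Nate","lazy"),("Paula","sisterly"),("Pinky","peppy"),("Klaus","smug"),("Teddy","jock"),("Tutu","peppy")]
def pvBird : PySem.Dict String String := PySem.Dict.ofList
  [("Jitters","jock"),("Jay","jock"),("Jacques","smug"),("Anchovy","lazy"),("Peck","jock"),("Lucha","smug"),("Midge","normal"),("Sparro","jock"),("Robin","snooty"),("Twiggy","peppy")]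
def pvCat : PySem.Dict String String := PySem.Dict.ofList
  [("Katt","sisterly"),("Kabuki","cranky"),("Felicity","peppy"),("Ankha","snooty"),("Bob","lazy"),("Monique","snooty"),("Olivia","snooty"),("Kitty","snooty"),("Kiki","normal"),("Lolly","normal"),("Kid Cat","jock"),("Merry","peppy"),("Rosie","peppy"),("Rudy","jock"),("Purri","snooty"),("Punchy","lazy"),("Tom","cranky")]
def pvCub : PySem.Dict String String := PySem.Dict.ofList
  [("Barold","lazy"),("Bluebear","peppy"),("Chester","lazy"),("Cheri","peppy"),("Poncho","jock"),("Pekoe","normal"),("Kody","jock"),("Maple","normal"),("Pudge","lazy")]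
def pvDog : PySem.Dict String String := PySem.Dict.ofList
  [("Goldie","normal"),("Daisy","normal"),("Biskit","lazy"),("Benjamin","lazy"),("Butch","cranky"),("Bones","lazy"),("Cherry","sisterly"),("Portia","snooty"),("Lucky","lazy"),("Marcel","lazy"),("Mac","jock"),("Shep","smug"),("Walker","lazy")]
def pvEagle : PySem.Dict String String := PySem.Dict.ofList
  [("Keaton","smug"),("Frank","cranky"),("Avery","cranky"),("Amelia","snooty"),("Apollo","cranky"),("Celia","normal"),("Pierce","jock"),("Sterling","jock")]

def dict_of_anim : PySem.Dict String (PySem.Dict String String) :=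
  ((((((PySem.Dict.empty.insert "Alligator" pvAlligator).insert "Bear" pvBear).insert
      "Bird" pvBird).insert "Cat" pvCat).insert "Cub" pvCub).insert "Dog" pvDog).insert
      "Eagle" pvEagle

-- 'for a in dicts[spe]: if check.lower() == dicts[spe].get(a).lower(): return True'
def pvInnerLoop (check : String) (d : PySem.Dict String String) : List String → Bool
  | [] => false
  | a :: rest =>
      if PySem.Str.lower check == PySem.Str.lower ((d.get? a).getD "") then true
      else pvInnerLoop check d rest

-- 'for spe in dicts.keys(): …'
def pvOuterLoop (check : String) (dicts : PySem.Dict String (PySem.Dict String String)) :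
    List String → Bool
  | [] => false
  | spe :: rest =>
      let d := (dicts.get? spe).getD PySem.Dict.empty
      if pvInnerLoop check d d.keys then true else pvOuterLoop check dicts rest

def is_personality_animal (input_list : List String) : Bool :=
  let dicts := dict_of_anim
  match list_to_string input_list " " with
  | none => false   -- Python raises IndexError here; excluded by Pre_
  | some check => pvOuterLoop check dicts dicts.keys

-- ===== PORT B =====
def pvPERSONALITIES : List String :=
  ["lazy", "snooty", "cranky", "normal", "jock", "smug", "sisterly", "peppy"]

-- 'if len(input_list) != 1: return False' then 'input_list[0].lower() in PERSONALITIES'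
def is_personality_animal_alt (input_list : List String) : Bool :=
  match input_list with
  | [w] => pvPERSONALITIES.contains (PySem.Str.lower w)
  | _ => false

-- ===== PRECONDITION & SPEC =====
-- A raises IndexError on the empty list (input_list[0] in list_to_string); excluded.
def Pre_is_personality_animal (input_list : List String) : Prop := input_list ≠ []
instance (input_list : List String) : Decidable (Pre_is_personality_animal input_list) := by
  unfold Pre_is_personality_animal; infer_instance
def pvWitness_is_personality_animal : List String := ["lazy"]

def Spec_is_personality_animal (input_list : List String) (out : Bool) : Prop :=
  out = is_personality_animal_alt input_list
instance (input_list : List String) (out : Bool) : Decidable (Spec_is_personality_animal input_list out) := by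
  unfold Spec_is_personality_animal; infer_instance

-- ===== CLAIM (what is proved, stated in full; the proofs are below) =====
def Claim_equal_is_personality_animal : Prop :=
  ∀ (input_list : List String), Dom_is_personality_animal input_list →
    Pre_is_personality_animal input_list →
    Spec_is_personality_animal input_list (is_personality_animal input_list)

-- ===== LEMMAS AND PROOFS =====

lemma pvInnerLoop_eq_any (check : String) (d : PySem.Dict String String) (keys : List String) :
    pvInnerLoop check d keys =
      (keys.map (fun a => PySem.Str.lower ((d.get? a).getD ""))).any
        (fun v => PySem.Str.lower check == v) := by
  induction keys with
  | nil => rfl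
  | cons a rest ih =>
      simp only [pvInnerLoop, List.map_cons, List.any_cons, ih]
      by_cases h : PySem.Str.lower check == PySem.Str.lower ((d.get? a).getD "")
      · simp [h]
      · simp [h]

lemma chars_join_shift (a b : List Char) (r : List (List Char)) :
    PySem.Chars.join [' '] ((a ++ ' ' :: b) :: r) = PySem.Chars.join [' '] (a :: b :: r) := by
  cases r with
  | nil =>
      rw [PySem.Chars.join_singleton, PySem.Chars.join_cons_cons, PySem.Chars.join_singleton]
      simp
  | cons c r =>
      rw [PySem.Chars.join_cons_cons, PySem.Chars.join_cons_cons, PySem.Chars.join_cons_cons]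
      simp

lemma pvFold_eq_join (rest : List String) (x : String) :
    List.foldl (fun output i => string_concatenator output i " ") x rest =
      PySem.Str.join " " (x :: rest) := by
  induction rest generalizing x with
  | nil =>
      apply String.toList_inj.mp
      simp [PySem.Chars.join_singleton]
  | cons i rest ih =>
      rw [List.foldl_cons, ih]
      apply String.toList_inj.mp
      simp only [PySem.Str.toList_join]
      simp [string_concatenator]
      exact chars_join_shift _ _ _

set_option maxHeartbeats 1000000 in
lemma pvLoop_eq_contains (check : String) :
    pvOuterLoop check dict_of_anim dict_of_anim.keys =
      pvPERSONALITIES.contains (PySem.Str.lower check) := by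
  have hk : dict_of_anim.keys = ["Alligator","Bear","Bird","Cat","Cub","Dog","Eagle"] := by decide
  rw [hk]
  simp only [pvOuterLoop, pvInnerLoop_eq_any]
  have h1 : (List.map (fun a => PySem.Str.lower ((((dict_of_anim.get? "Alligator").getD PySem.Dict.empty).get? a).getD ""))
      ((dict_of_anim.get? "Alligator").getD PySem.Dict.empty).keys) = ["lazy","snooty","cranky","lazy","normal","jock"] := by decide
  have h2 : (List.map (fun a => PySem.Str.lower ((((dict_of_anim.get? "Bear").getD PySem.Dict.empty).get? a).getD ""))
      ((dict_of_anim.get? "Bear").getD PySem.Dict.empty).keys) = ["cranky","cranky","cranky","smug","sisterly","cranky","lazy","sisterly","peppy","smug","jock","peppy"] := by decide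
  have h3 : (List.map (fun a => PySem.Str.lower ((((dict_of_anim.get? "Bird").getD PySem.Dict.empty).get? a).getD ""))
      ((dict_of_anim.get? "Bird").getD PySem.Dict.empty).keys) = ["jock","jock","smug","lazy","jock","smug","normal","jock","snooty","peppy"] := by decide
  have h4 : (List.map (fun a => PySem.Str.lower ((((dict_of_anim.get? "Cat").getD PySem.Dict.empty).get? a).getD ""))
      ((dict_of_anim.get? "Cat").getD PySem.Dict.empty).keys) = ["sisterly","cranky","peppy","snooty","lazy","snooty","snooty","snooty","normal","normal","jock","peppy","peppy","jock","snooty","lazy","cranky"] := by decide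
  have h5 : (List.map (fun a => PySem.Str.lower ((((dict_of_anim.get? "Cub").getD PySem.Dict.empty).get? a).getD ""))
      ((dict_of_anim.get? "Cub").getD PySem.Dict.empty).keys) = ["lazy","peppy","lazy","peppy","jock","normal","jock","normal","lazy"] := by decide
  have h6 : (List.map (fun a => PySem.Str.lower ((((dict_of_anim.get? "Dog").getD PySem.Dict.empty).get? a).getD ""))
      ((dict_of_anim.get? "Dog").getD PySem.Dict.empty).keys) = ["normal","normal","lazy","lazy","cranky","lazy","sisterly","snooty","lazy","lazy","jock","smug","lazy"] := by decide
  have h7 : (List.map (fun a => PySem.Str.lower ((((dict_of_anim.get? "Eagle").getD PySem.Dict.empty).get? a).getD ""))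
      ((dict_of_anim.get? "Eagle").getD PySem.Dict.empty).keys) = ["smug","cranky","cranky","snooty","cranky","normal","jock","jock"] := by decide
  rw [h1, h2, h3, h4, h5, h6, h7]
  have hif : ∀ (c x : Bool), (if c = true then true else x) = (c || x) := by
    intro c x; cases c <;> simp
  simp only [hif]
  generalize PySem.Str.lower check = s
  refine Bool.eq_iff_iff.mpr ?_
  simp only [pvPERSONALITIES, Bool.or_eq_true, List.any_eq_true, List.mem_cons,
    List.not_mem_nil, beq_iff_eq, List.contains_iff_mem,
    Bool.false_eq_true, or_false, exists_eq_right']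
  constructor
  · rintro ((h|h|h|h|h|h)|(h|h|h|h|h|h|h|h|h|h|h|h)|(h|h|h|h|h|h|h|h|h|h)|(h|h|h|h|h|h|h|h|h|h|h|h|h|h|h|h|h)|(h|h|h|h|h|h|h|h|h)|(h|h|h|h|h|h|h|h|h|h|h|h|h)|(h|h|h|h|h|h|h|h)) <;> rw [h] <;> simp
  · rintro (h|h|h|h|h|h|h|h) <;> rw [h] <;> simp

-- No personality value contains a space.
lemma pvSpace_not_mem (s : String) (h : ' ' ∈ s.toList) :
    pvPERSONALITIES.contains s = false := by
  rw [Bool.eq_false_iff]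
  intro hc
  have hmem : s ∈ pvPERSONALITIES := by
    simpa [List.contains_iff_mem] using hc
  simp only [pvPERSONALITIES, List.mem_cons, List.not_mem_nil, or_false] at hmem
  rcases hmem with h'|h'|h'|h'|h'|h'|h'|h' <;> subst h' <;> revert h <;> decide

-- Lowercasing keeps the space.
lemma pvSpace_mem_lower (s : String) (h : ' ' ∈ s.toList) :
    ' ' ∈ (PySem.Str.lower s).toList := by
  rw [PySem.Str.toList_lower]
  simp only [PySem.Chars.lower]
  exact List.mem_map.mpr ⟨' ', h, by decide⟩

lemma pvSpace_mem_join (x y : String) (rest : List String) :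
    ' ' ∈ (PySem.Str.join " " (x :: y :: rest)).toList := by
  rw [PySem.Str.toList_join]
  simp only [List.map_cons]
  rw [show (" ".toList = [' ']) from rfl, PySem.Chars.join_cons_cons]
  simp

-- ===== VERDICT (by name: the statement is the Claim_ definition above) =====
theorem is_personality_animal_spec : Claim_equal_is_personality_animal := by
  intro input_list _hdom hpre
  unfold Spec_is_personality_animal
  match input_list, hpre with
  | [x], _ =>
      show is_personality_animal [x] = _
      unfold is_personality_animal is_personality_animal_alt
      have h0 : list_to_string [x] " " = some x := by
        simp [list_to_string, PySem.List.pyGet?, PySem.List.pyIdx?, PySem.List.slice,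
          string_concatenator]
      rw [h0]
      exact pvLoop_eq_contains x
  | x :: y :: rest, _ =>
      show is_personality_animal (x :: y :: rest) = _
      unfold is_personality_animal is_personality_animal_alt
      have h0 : list_to_string (x :: y :: rest) " " =
          some (List.foldl (fun output i => string_concatenator output i " ") x (y :: rest)) := by
        have hnn : (0:Int) ≤ (rest.length : Int) + 1 := by positivity
        simp [list_to_string, PySem.List.pyGet?, PySem.List.pyIdx?, PySem.List.slice, hnn]
      rw [h0]
      simp only [pvFold_eq_join, pvLoop_eq_contains]
      exact pvSpace_not_mem _ (pvSpace_mem_lower _ (pvSpace_mem_join x y rest))
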